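-- pv_equiv track=rewrite | github.com/nwoeanhinnogaehr/bytebeat-udls | generate.py | toscale
-- ===== SOURCE A (Python) =====
-- def popcnt(x):
--     return bin(x).count('1')
--
-- def toscale(scale, note):
--     poct = popcnt(scale)
--     n = note%(poct+1)
--     c = 0
--     o = 0
--     for i in format(scale,'012b'):
--         if i == '1':
--             c += 1
--         if c-1 == n:
--             break
--         o += 1
--     return o + note//12*12
-- ===== SOURCE B (Python) =====
-- def popcnt(x):
--     return bin(x).count('1')
--
-- def toscale(scale, note):
--     s = format(scale, '012b')
--     positions = [i for i, ch in enumerate(s) if ch == '1']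
--     n = note % (popcnt(scale) + 1)
--     o = positions[n] if n < len(positions) else len(s)
--     return o + note // 12 * 12
-- ===== Notes on version B (the rewrite author's own statement) =====
-- stated objective: simpler
-- what changed: Replaces A's interleaved counter/break scan over the formatted bit string with a build-then-lookup decomposition: collect the indices of '1' characters once, then select the n-th index (or the string length when n is past the last set bit).
import Mathlib
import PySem

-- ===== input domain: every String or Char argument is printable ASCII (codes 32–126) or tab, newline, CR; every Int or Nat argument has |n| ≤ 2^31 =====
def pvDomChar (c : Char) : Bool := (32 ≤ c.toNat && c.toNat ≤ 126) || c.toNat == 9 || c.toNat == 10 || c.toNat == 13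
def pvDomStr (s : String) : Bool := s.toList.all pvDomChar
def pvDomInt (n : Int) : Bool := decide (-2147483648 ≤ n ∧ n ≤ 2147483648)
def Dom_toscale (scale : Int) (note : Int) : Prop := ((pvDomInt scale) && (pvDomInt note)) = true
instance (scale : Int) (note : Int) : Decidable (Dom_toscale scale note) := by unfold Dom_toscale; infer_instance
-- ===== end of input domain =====

-- B replaces A's interleaved counter/break scan with a build-the-index-then-look-up
-- decomposition (positions of set bits computed once, then one O(1) selection): simpler.

-- ===== PORT A =====
-- bin(x).count('1'): Python's bin uses the binary digits of |x|
def popcnt (x : Int) : Int := ((Nat.toDigits 2 x.natAbs).count '1' : Int)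

-- format(x,'012b'): binary of |x|, zero-padded to total width 12 (sign included in width)
def format012b (x : Int) : List Char :=
  let d := Nat.toDigits 2 x.natAbs
  if x < 0 then '-' :: (List.replicate (11 - d.length) '0' ++ d)
  else List.replicate (12 - d.length) '0' ++ d

-- A's for-loop with break, state (c, o)
def toscaleLoop (n : Int) : List Char → Int → Int → Int
  | [], _, o => o
  | ch :: t, c, o =>
      let c' := if ch = '1' then c + 1 else c
      if c' - 1 = n then o else toscaleLoop n t c' (o + 1)

def toscale (scale : Int) (note : Int) : Int :=
  let poct := popcnt scale
  let n := PySem.Int.mod note (poct + 1)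
  toscaleLoop n (format012b scale) 0 0 + PySem.Int.floordiv note 12 * 12

-- ===== PORT B =====
def toscale_alt (scale : Int) (note : Int) : Int :=
  let s := format012b scale
  let positions := ((PySem.List.enumerate s).filter (fun p => p.2 = '1')).map (·.1)
  let n := PySem.Int.mod note (popcnt scale + 1)
  let o : Int := if n < (positions.length : Int) then positions.getD n.toNat 0 else (s.length : Int)
  o + PySem.Int.floordiv note 12 * 12

-- ===== PRECONDITION & SPEC =====
def Spec_toscale (scale : Int) (note : Int) (out : Int) : Prop := out = toscale_alt scale note
instance (scale : Int) (note : Int) (out : Int) : Decidable (Spec_toscale scale note out) := by unfold Spec_toscale; infer_instance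

-- ===== CLAIM (what is proved, stated in full; the proofs are below) =====
def Claim_equal_toscale : Prop := ∀ (scale : Int) (note : Int), Dom_toscale scale note → Spec_toscale scale note (toscale scale note)

-- ===== LEMMAS AND PROOFS =====

-- positions of '1' in s, offset by the start index k
def posns (s : List Char) (k : Int) : List Int :=
  ((PySem.List.enumerate s k).filter (fun p => p.2 = '1')).map (·.1)

theorem posns_cons (ch : Char) (t : List Char) (k : Int) :
    posns (ch :: t) k = if ch = '1' then k :: posns t (k + 1) else posns t (k + 1) := by
  by_cases h : ch = '1' <;>
    simp [posns, PySem.List.enumerate_cons, List.filter_cons, h]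

theorem loop_eq (s : List Char) (n : Int) : ∀ (c o : Int), c ≤ n →
    toscaleLoop n s c o =
      if n - c < ((posns s o).length : Int) then (posns s o).getD (n - c).toNat 0
      else o + (s.length : Int) := by
  induction s with
  | nil =>
    intro c o hc
    simp only [toscaleLoop, posns, PySem.List.enumerate_nil, List.filter_nil, List.map_nil,
      List.length_nil, List.length_nil, Int.natCast_zero, List.getD]
    rw [if_neg (by omega)]
    simp
  | cons ch t ih =>
    intro c o hc
    rw [posns_cons]
    by_cases h1 : ch = '1'
    · simp only [toscaleLoop, h1, if_true]
      by_cases hbreak : c + 1 - 1 = n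
      · have hn : n - c = 0 := by omega
        simp [hbreak, hn]
      · have hlt : c + 1 ≤ n := by omega
        rw [if_neg hbreak, ih (c + 1) (o + 1) hlt]
        have h1' : (1 : Int) ≤ n - c := by omega
        have htn : (n - c).toNat = (n - (c + 1)).toNat + 1 := by omega
        simp only [List.length_cons, htn]
        by_cases hlen : n - (c + 1) < ((posns t (o + 1)).length : Int)
        · rw [if_pos hlen, if_pos (by push_cast; omega)]
          simp [List.getD]
        · rw [if_neg hlen, if_neg (by push_cast at hlen ⊢; omega)]
          push_cast; ring
    · simp only [toscaleLoop, h1, if_false]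
      have hnb : ¬ (c - 1 = n) := by omega
      rw [if_neg hnb, ih c (o + 1) hc]
      split_ifs with hlen
      · rfl
      · simp only [List.length_cons]; push_cast; ring

-- ===== VERDICT (by name: the statement is the Claim_ definition above) =====
theorem toscale_spec : Claim_equal_toscale := by
  intro scale note _
  simp only [Spec_toscale, toscale, toscale_alt]
  have hpoct : (0 : Int) ≤ popcnt scale := by
    unfold popcnt; exact_mod_cast Int.natCast_nonneg _
  have hn : (0 : Int) ≤ PySem.Int.mod note (popcnt scale + 1) :=
    PySem.Int.mod_nonneg _ (by omega)
  rw [loop_eq (format012b scale) _ 0 0 hn]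
  simp only [sub_zero, zero_add]
  rfl
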